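-- pv_equiv track=rewrite | github.com/kasperlindau/OptiSkane | src/backend.py | _filter_journeys
-- ===== SOURCE A (Python) =====
-- def _filter_journeys(journeys):
--     """Filters journeys based on criteria."""
--
--     # Filter similar journeys by departure & arrival time
--     filtered_journeys = dict()
--     for journey in journeys:
--         if journey["departure_time"] not in filtered_journeys:
--             filtered_journeys[journey["departure_time"]] = journey
--         if journey["arrival_time"] < filtered_journeys[journey["departure_time"]]["arrival_time"]:
--             filtered_journeys[journey["departure_time"]] = journey
--     return [filtered_journeys[k] for k in sorted(filtered_journeys.keys())]
-- ===== SOURCE B (Python) =====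
-- def _filter_journeys(journeys):
--     """Filters journeys based on criteria."""
--     # Stable double sort = sort by (departure_time, arrival_time);
--     # then keep the first journey seen for each departure_time.
--     ordered = sorted(sorted(journeys, key=lambda j: j["arrival_time"]),
--                      key=lambda j: j["departure_time"])
--     seen = set()
--     result = []
--     for journey in ordered:
--         if journey["departure_time"] not in seen:
--             seen.add(journey["departure_time"])
--             result.append(journey)
--     return result
-- ===== Notes on version B (the rewrite author's own statement) =====
-- stated objective: alternative
-- what changed: Replaces A's dict-of-running-minima (keyed by departure, overwritten on strictly smaller arrival, then a final sort of the keys) by a stable sort of all journeys by (departure_time, arrival_time) followed by a single scan that keeps the first journey per departure_time.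
import Mathlib
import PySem

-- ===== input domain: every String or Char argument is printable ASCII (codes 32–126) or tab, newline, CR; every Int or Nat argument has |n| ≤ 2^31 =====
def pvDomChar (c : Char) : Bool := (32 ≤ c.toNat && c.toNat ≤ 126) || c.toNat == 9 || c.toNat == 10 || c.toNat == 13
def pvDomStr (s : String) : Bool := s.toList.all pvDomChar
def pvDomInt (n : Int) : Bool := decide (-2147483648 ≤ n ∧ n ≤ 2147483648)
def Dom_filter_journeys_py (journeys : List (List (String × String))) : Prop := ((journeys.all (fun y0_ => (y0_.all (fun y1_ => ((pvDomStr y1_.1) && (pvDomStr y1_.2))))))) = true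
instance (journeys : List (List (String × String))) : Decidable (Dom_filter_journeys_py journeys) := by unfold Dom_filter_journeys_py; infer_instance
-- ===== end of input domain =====

-- B replaces A's dict of per-departure running minima (plus a final key sort) by one stable
-- sort by (departure_time, arrival_time) and a first-occurrence scan; alternative algorithm, same results.


-- shared helper: journey["k"] on an association-list dict (first match; the "" default is
-- unreachable under Pre_, which guarantees both keys are present)
def pvLook (j : List (String × String)) (k : String) : String :=
  ((j.find? (fun p => p.1 == k)).map Prod.snd).getD ""

def pvDep (j : List (String × String)) : String := pvLook j "departure_time"
def pvArr (j : List (String × String)) : String := pvLook j "arrival_time"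

-- ===== PORT A =====
-- loop body of A: conditionally seed the dict entry, then overwrite on strictly smaller arrival
def pvStepA (d : PySem.Dict String (List (String × String))) (j : List (String × String)) :
    PySem.Dict String (List (String × String)) :=
  let d1 := if d.contains (pvDep j) then d else d.insert (pvDep j) j
  if pvArr j < pvArr (d1.getD (pvDep j) []) then d1.insert (pvDep j) j else d1

def filter_journeys_py (journeys : List (List (String × String))) : List (List (String × String)) :=
  let d := journeys.foldl pvStepA PySem.Dict.empty
  (PySem.List.sorted d.keys (fun k => k) false).map (fun k => d.getD k [])

-- ===== PORT B =====
-- loop body of B: append the journey the first time its departure_time is seen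
def pvStepB (acc : PySem.Set String × List (List (String × String))) (j : List (String × String)) :
    PySem.Set String × List (List (String × String)) :=
  if PySem.Set.contains acc.1 (pvDep j) then acc else (PySem.Set.add acc.1 (pvDep j), acc.2 ++ [j])

def filter_journeys_py_alt (journeys : List (List (String × String))) : List (List (String × String)) :=
  let ordered := PySem.List.sorted (PySem.List.sorted journeys pvArr false) pvDep false
  (ordered.foldl pvStepB ((PySem.Set.empty : PySem.Set String), ([] : List (List (String × String))))).2

-- ===== PRECONDITION & SPEC =====
-- Pre_ excludes exactly the inputs on which the Python A raises KeyError: some journey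
-- missing the "departure_time" or "arrival_time" key.
def Pre_filter_journeys_py (journeys : List (List (String × String))) : Prop :=
  ∀ j ∈ journeys, "departure_time" ∈ j.map Prod.fst ∧ "arrival_time" ∈ j.map Prod.fst
instance (journeys : List (List (String × String))) : Decidable (Pre_filter_journeys_py journeys) := by
  unfold Pre_filter_journeys_py; infer_instance

def pvWitness_filter_journeys_py : (List (List (String × String))) :=
  [[("departure_time", "08:00"), ("arrival_time", "09:00")],
   [("departure_time", "08:00"), ("arrival_time", "08:45")]]

def Spec_filter_journeys_py (journeys : List (List (String × String))) (out : List (List (String × String))) : Prop := out = filter_journeys_py_alt journeys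
instance (journeys : List (List (String × String))) (out : List (List (String × String))) : Decidable (Spec_filter_journeys_py journeys out) := by unfold Spec_filter_journeys_py; infer_instance

-- ===== CLAIM (what is proved, stated in full; the proofs are below) =====
def Claim_equal_filter_journeys_py : Prop := ∀ (journeys : List (List (String × String))), Dom_filter_journeys_py journeys → Pre_filter_journeys_py journeys → Spec_filter_journeys_py journeys (filter_journeys_py journeys)

-- ===== LEMMAS AND PROOFS =====

-- the "first strictly-smaller-arrival wins" running minimum that A's dict entry follows
def pvRunStep (o : Option (List (String × String))) (j : List (String × String)) :
    Option (List (String × String)) :=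
  match o with
  | none => some j
  | some c => if pvArr j < pvArr c then some j else some c

def pvRun (o : Option (List (String × String))) (l : List (List (String × String))) :
    Option (List (String × String)) :=
  l.foldl pvRunStep o

-- B's scan, as a structural recursion
def pvScan (seen : PySem.Set String) : List (List (String × String)) → List (List (String × String))
  | [] => []
  | j :: t => if PySem.Set.contains seen (pvDep j) then pvScan seen t
              else j :: pvScan (PySem.Set.add seen (pvDep j)) t

-- first occurrences of l not already in seen, in order
def pvNew (seen : List String) : List String → List String
  | [] => []
  | c :: t => if seen.contains c then pvNew seen t else c :: pvNew (seen ++ [c]) t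

theorem pv_scan_foldl (s : List (List (String × String))) :
    ∀ (seen : PySem.Set String) (out : List (List (String × String))),
    (s.foldl pvStepB (seen, out)).2 = out ++ pvScan seen s := by
  induction s with
  | nil => intro seen out; simp [pvScan]
  | cons j t ih =>
    intro seen out
    by_cases h : pvDep j ∈ seen
    · simp [pvStepB, pvScan, h, ih]
    · simp [pvStepB, pvScan, h, ih]

theorem pv_new_not_seen (l : List String) :
    ∀ (seen : List String) (x : String), x ∈ pvNew seen l → seen.contains x = false := by
  induction l with
  | nil => intro seen x hx; simp [pvNew] at hx
  | cons c t ih =>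
    intro seen x hx
    by_cases h : seen.contains c = true
    · rw [pvNew, if_pos h] at hx
      exact ih seen x hx
    · simp only [Bool.not_eq_true] at h
      rw [pvNew, if_neg (by rw [h]; exact Bool.false_ne_true)] at hx
      rcases List.mem_cons.mp hx with rfl | hx
      · exact h
      · have := ih (seen ++ [c]) x hx
        simp only [List.contains_append, Bool.or_eq_false_iff] at this
        exact this.1

theorem pv_foldl_add_eq_append_new (l : List String) :
    ∀ (seen : PySem.Set String), l.foldl PySem.Set.add seen = seen ++ pvNew seen l := by
  induction l with
  | nil => intro seen; simp [pvNew]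
  | cons c t ih =>
    intro seen
    have hsc : ∀ (s : List String) (x : String), s.contains x = decide (x ∈ s) := by
      intro s x; simp
    by_cases h : c ∈ seen
    · rw [List.foldl_cons, pvNew, hsc, if_pos (by simpa [hsc] using h)]
      simpa [PySem.Set.add, PySem.Set.contains, h] using ih seen
    · rw [List.foldl_cons, pvNew, hsc, if_neg (by simpa [hsc] using h)]
      have : PySem.Set.add seen c = seen ++ [c] := by
        simp [PySem.Set.add, PySem.Set.contains, h]
      rw [this, ih (seen ++ [c])]
      simp

theorem pv_ofList_eq_new (l : List String) : PySem.Set.ofList l = pvNew [] l := by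
  rw [PySem.Set.ofList_eq_foldl, pv_foldl_add_eq_append_new]
  simp

theorem pv_new_sublist (l : List String) : ∀ (seen : List String), (pvNew seen l).Sublist l := by
  induction l with
  | nil => intro seen; simp [pvNew]
  | cons c t ih =>
    intro seen
    by_cases h : seen.contains c = true
    · rw [pvNew, if_pos h]
      exact (ih seen).cons c
    · simp only [Bool.not_eq_true] at h
      rw [pvNew, if_neg (by rw [h]; exact Bool.false_ne_true)]
      exact (ih (seen ++ [c])).cons₂ c

theorem pv_contains_eq_decide (l : List String) (x : String) :
    l.contains x = decide (x ∈ l) := by simp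

theorem pv_scan_eq_map (s : List (List (String × String))) :
    ∀ (seen : PySem.Set String),
    pvScan seen s = (pvNew seen (s.map pvDep)).map
      (fun c => (s.filter (fun x => pvDep x == c)).headD []) := by
  induction s with
  | nil => intro seen; simp [pvScan, pvNew]
  | cons j t ih =>
    intro seen
    by_cases h : pvDep j ∈ seen
    · have hc : PySem.Set.contains seen (pvDep j) = true := by
        rw [PySem.Set.contains, pv_contains_eq_decide]; exact decide_eq_true h
      have hcL : List.contains seen (pvDep j) = true := hc
      rw [List.map_cons, pvScan, if_pos hc, pvNew, if_pos hcL, ih seen]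
      apply List.map_congr_left
      intro c hcmem
      have hns : seen.contains c = false := pv_new_not_seen _ seen c hcmem
      have hne : (pvDep j == c) = false := by
        apply beq_eq_false_iff_ne.mpr
        intro heq
        rw [← heq] at hns
        exact Bool.noConfusion
          (hc.symm.trans (hns : PySem.Set.contains seen (pvDep j) = false))
      rw [List.filter_cons_of_neg (by rw [hne]; exact Bool.false_ne_true)]
    · have hc : PySem.Set.contains seen (pvDep j) = false := by
        rw [PySem.Set.contains, pv_contains_eq_decide]; exact decide_eq_false h
      have hcne : ¬ (PySem.Set.contains seen (pvDep j) = true) := by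
        rw [hc]; exact Bool.false_ne_true
      have hadd : PySem.Set.add seen (pvDep j) = seen ++ [pvDep j] := by
        rw [PySem.Set.add, if_neg hcne]
      have hcneL : ¬ (List.contains seen (pvDep j) = true) := hcne
      rw [List.map_cons, pvScan, if_neg hcne, pvNew, if_neg hcneL, List.map_cons]
      congr 1
      · rw [List.filter_cons_of_pos (by simp), List.headD_cons]
      · rw [← hadd, ih (PySem.Set.add seen (pvDep j))]
        apply List.map_congr_left
        intro c hcmem
        have hns : List.contains (seen ++ [pvDep j]) c = false := by
          have h' := pv_new_not_seen _ _ c hcmem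
          rw [hadd] at h'
          exact h'
        have hne : (pvDep j == c) = false := by
          apply beq_eq_false_iff_ne.mpr
          intro heq
          rw [List.contains_append, Bool.or_eq_false_iff] at hns
          have := hns.2
          rw [pv_contains_eq_decide] at this
          exact (of_decide_eq_false this) (by rw [heq]; exact List.mem_singleton.mpr rfl)
        rw [List.filter_cons_of_neg (by rw [hne]; exact Bool.false_ne_true)]

theorem pv_stepA_eq (d : PySem.Dict String (List (String × String)))
    (j : List (String × String)) :
    pvStepA d j =
      (if pvArr j < pvArr ((if d.contains (pvDep j) = true then d else d.insert (pvDep j) j).getD (pvDep j) [])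
        then (if d.contains (pvDep j) = true then d else d.insert (pvDep j) j).insert (pvDep j) j
        else (if d.contains (pvDep j) = true then d else d.insert (pvDep j) j)) := rfl

theorem pv_stepA_get? (d : PySem.Dict String (List (String × String)))
    (j : List (String × String)) (c : String) :
    (pvStepA d j).get? c = if pvDep j = c then pvRunStep (d.get? c) j else d.get? c := by
  rw [pv_stepA_eq]
  by_cases hc : d.contains (pvDep j) = true
  · rw [if_pos hc]
    rcases ho : d.get? (pvDep j) with _ | cur
    · exact Bool.noConfusion
        (((PySem.Dict.get?_eq_none_iff_contains d (pvDep j)).mp ho).symm.trans hc)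
    · have hgd : d.getD (pvDep j) [] = cur := PySem.Dict.getD_of_get?_eq_some d [] ho
      rw [hgd]
      by_cases he : pvDep j = c
      · rw [if_pos he, ← he, ho]
        by_cases ha : pvArr j < pvArr cur
        · rw [if_pos ha, PySem.Dict.get?_insert, if_pos rfl, pvRunStep, if_pos ha]
        · rw [if_neg ha, pvRunStep, if_neg ha, ho]
      · by_cases ha : pvArr j < pvArr cur
        · rw [if_pos ha, PySem.Dict.get?_insert, if_neg (fun hh => he hh.symm), if_neg he]
        · rw [if_neg ha, if_neg he]
  · have hcf : d.contains (pvDep j) = false := by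
      revert hc; cases d.contains (pvDep j) <;> simp
    rw [if_neg hc]
    have hgd : (d.insert (pvDep j) j).getD (pvDep j) [] = j :=
      PySem.Dict.getD_of_get?_eq_some _ [] (PySem.Dict.get?_insert_self d (pvDep j) j)
    rw [hgd, if_neg (lt_irrefl (pvArr j)), PySem.Dict.get?_insert]
    by_cases he : pvDep j = c
    · rw [if_pos he.symm, if_pos he, ← he,
        (PySem.Dict.get?_eq_none_iff_contains d (pvDep j)).mpr hcf, pvRunStep]
    · rw [if_neg (fun hh => he hh.symm), if_neg he]

theorem pv_foldA_get? (l : List (List (String × String))) :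
    ∀ (d : PySem.Dict String (List (String × String))) (c : String),
    (l.foldl pvStepA d).get? c = pvRun (d.get? c) (l.filter (fun x => pvDep x == c)) := by
  induction l with
  | nil => intro d c; simp [pvRun]
  | cons j t ih =>
    intro d c
    rw [List.foldl_cons, ih, pv_stepA_get?]
    by_cases he : pvDep j = c
    · rw [if_pos he, List.filter_cons_of_pos (by simp [he])]
      rfl
    · rw [if_neg he, List.filter_cons_of_neg (by simp [he])]

theorem pv_stepA_keys (d : PySem.Dict String (List (String × String)))
    (j : List (String × String)) :
    (pvStepA d j).keys = PySem.Set.add d.keys (pvDep j) := by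
  rw [pv_stepA_eq]
  by_cases hc : d.contains (pvDep j) = true
  · have hmem : pvDep j ∈ d.keys := (PySem.Dict.contains_iff_mem_keys d (pvDep j)).mp hc
    have haddk : PySem.Set.add d.keys (pvDep j) = d.keys := by
      rw [PySem.Set.add,
        if_pos (by rw [PySem.Set.contains, pv_contains_eq_decide]; exact decide_eq_true hmem)]
    rw [if_pos hc, haddk]
    by_cases ha : pvArr j < pvArr (d.getD (pvDep j) [])
    · rw [if_pos ha, PySem.Dict.keys_insert_of_contains d j hc]
    · rw [if_neg ha]
  · have hcf : d.contains (pvDep j) = false := by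
      revert hc; cases d.contains (pvDep j) <;> simp
    have hnmem : pvDep j ∉ d.keys := fun hm =>
      Bool.noConfusion (hcf.symm.trans ((PySem.Dict.contains_iff_mem_keys d (pvDep j)).mpr hm))
    have haddk : PySem.Set.add d.keys (pvDep j) = d.keys ++ [pvDep j] := by
      rw [PySem.Set.add, if_neg (by
        rw [PySem.Set.contains, pv_contains_eq_decide, decide_eq_false hnmem]
        exact Bool.false_ne_true)]
    rw [if_neg hc]
    have hgd : (d.insert (pvDep j) j).getD (pvDep j) [] = j :=
      PySem.Dict.getD_of_get?_eq_some _ [] (PySem.Dict.get?_insert_self d (pvDep j) j)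
    rw [hgd, if_neg (lt_irrefl (pvArr j)), haddk,
      PySem.Dict.keys_insert_of_not_contains d j hcf]

theorem pv_foldA_keys (l : List (List (String × String))) :
    ∀ (d : PySem.Dict String (List (String × String))),
    (l.foldl pvStepA d).keys = (l.map pvDep).foldl PySem.Set.add d.keys := by
  induction l with
  | nil => intro d; simp
  | cons j t ih =>
    intro d
    rw [List.foldl_cons, ih, List.map_cons, List.foldl_cons, pv_stepA_keys]

theorem pv_sorted_append {α κ : Type} [LT κ] [DecidableLT κ] (l : List α) (x : α) (key : α → κ) :
    PySem.List.sorted (l ++ [x]) key false =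
      PySem.List.insertBy (fun a b => decide (key a < key b)) x (PySem.List.sorted l key false) := by
  rw [PySem.List.sorted_eq_foldl_insertBy, PySem.List.sorted_eq_foldl_insertBy,
    List.foldl_append, List.foldl_cons, List.foldl_nil]

theorem pv_run_head (l : List (List (String × String))) :
    (PySem.List.sorted l pvArr false).head? = pvRun none l := by
  have hrapp : ∀ (l : List (List (String × String))) (x : List (String × String)),
      pvRun none (l ++ [x]) = pvRunStep (pvRun none l) x := by
    intro l x; rw [pvRun, List.foldl_append]; rfl
  induction l using List.reverseRecOn with
  | nil =>
    rw [(PySem.List.sorted_eq_nil_iff ([] : List (List (String × String))) pvArr false).mpr rfl]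
    rfl
  | append_singleton l x ih =>
    rw [pv_sorted_append, hrapp]
    rcases hs : PySem.List.sorted l pvArr false with _ | ⟨m, t⟩
    · have hl : l = [] := (PySem.List.sorted_eq_nil_iff l pvArr false).mp hs
      subst hl
      simp [PySem.List.insertBy, pvRun, pvRunStep]
    · rw [hs] at ih
      rw [← ih]
      by_cases ha : pvArr x < pvArr m
      · simp [PySem.List.insertBy, ha, pvRunStep]
      · simp [PySem.List.insertBy, ha, pvRunStep]

theorem pv_filter_insertBy_neg {α : Type} (bef : α → α → Bool) (p : α → Bool) (x : α)
    (hx : p x = false) : ∀ (ys : List α),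
    (PySem.List.insertBy bef x ys).filter p = ys.filter p := by
  intro ys
  induction ys with
  | nil => simp [PySem.List.insertBy, hx]
  | cons y t ih =>
    by_cases hb : bef x y = true
    · simp [PySem.List.insertBy, hb, hx, List.filter_cons]
    · have hbf : bef x y = false := by revert hb; cases bef x y <;> simp
      simp [PySem.List.insertBy, hbf, List.filter_cons, ih]

theorem pv_filter_insertBy_pos {α κ : Type} [LinearOrder κ] (key : α → κ) (p : α → Bool) (x : α)
    (hx : p x = true) : ∀ (ys : List α), ys.Pairwise (fun a b => key a ≤ key b) →
    (PySem.List.insertBy (fun a b => decide (key a < key b)) x ys).filter p =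
      PySem.List.insertBy (fun a b => decide (key a < key b)) x (ys.filter p) := by
  intro ys
  induction ys with
  | nil => intro _; simp [PySem.List.insertBy, hx]
  | cons y t ih =>
    intro hp
    have hy : ∀ z ∈ t, key y ≤ key z := (List.pairwise_cons.mp hp).1
    have hpt := (List.pairwise_cons.mp hp).2
    by_cases hb : key x < key y
    · rw [PySem.List.insertBy, if_pos (decide_eq_true hb),
        List.filter_cons_of_pos hx]
      rcases hz : List.filter p (y :: t) with _ | ⟨w, ws⟩
      · rw [PySem.List.insertBy]
      · have hw : w ∈ y :: t := List.mem_of_mem_filter (by rw [hz]; exact List.mem_cons_self ..)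
        have hlt : key x < key w := by
          rcases List.mem_cons.mp hw with rfl | hw'
          · exact hb
          · exact lt_of_lt_of_le hb (hy w hw')
        rw [PySem.List.insertBy, if_pos (decide_eq_true hlt)]
    · have hbf : decide (key x < key y) = false := decide_eq_false hb
      rw [PySem.List.insertBy, if_neg (by rw [hbf]; exact Bool.false_ne_true)]
      by_cases hpy : p y = true
      · rw [List.filter_cons_of_pos hpy, List.filter_cons_of_pos hpy, PySem.List.insertBy,
          if_neg (by rw [hbf]; exact Bool.false_ne_true), ih hpt]
      · have hpyf : p y = false := by revert hpy; cases p y <;> simp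
        rw [List.filter_cons_of_neg (by rw [hpyf]; exact Bool.false_ne_true),
          List.filter_cons_of_neg (by rw [hpyf]; exact Bool.false_ne_true), ih hpt]

theorem pv_filter_sorted {α κ : Type} [LinearOrder κ] (p : α → Bool) (key : α → κ)
    (l : List α) :
    (PySem.List.sorted l key false).filter p = PySem.List.sorted (l.filter p) key false := by
  induction l using List.reverseRecOn with
  | nil => simp
  | append_singleton l x ih =>
    rw [pv_sorted_append]
    by_cases hp : p x = true
    · have hfa : List.filter p (l ++ [x]) = List.filter p l ++ [x] := by
        rw [List.filter_append]; simp [hp]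
      rw [pv_filter_insertBy_pos key p x hp _ (PySem.List.sorted_pairwise l key), ih, hfa,
        pv_sorted_append]
    · have hpf : p x = false := by revert hp; cases p x <;> simp
      have hfa : List.filter p (l ++ [x]) = List.filter p l := by
        rw [List.filter_append]; simp [hpf]
      rw [pv_filter_insertBy_neg _ p x hpf, ih, hfa]

theorem pv_pairwise_filter_const (l : List (List (String × String))) (c : String) :
    (l.filter (fun x => pvDep x == c)).Pairwise (fun a b => pvDep a ≤ pvDep b) := by
  induction l with
  | nil => simp
  | cons j t ih =>
    by_cases hj : (pvDep j == c) = true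
    · rw [show List.filter (fun x => pvDep x == c) (j :: t)
            = j :: List.filter (fun x => pvDep x == c) t by simp [hj]]
      apply List.pairwise_cons.mpr
      refine ⟨fun z hz => ?_, ih⟩
      have hzc : (pvDep z == c) = true := (List.mem_filter.mp hz).2
      rw [eq_of_beq hj, eq_of_beq hzc]
    · have hjf : (pvDep j == c) = false := by revert hj; cases pvDep j == c <;> simp
      rw [List.filter_cons_of_neg (by rw [hjf]; exact Bool.false_ne_true)]
      exact ih

theorem pv_group_eq (journeys : List (List (String × String))) (c : String) :
    (PySem.List.sorted (PySem.List.sorted journeys pvArr false) pvDep false).filter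
        (fun x => pvDep x == c) =
      PySem.List.sorted (journeys.filter (fun x => pvDep x == c)) pvArr false := by
  rw [pv_filter_sorted (fun x => pvDep x == c) pvDep (PySem.List.sorted journeys pvArr false),
    PySem.List.sorted_eq_self_of_pairwise _ pvDep (pv_pairwise_filter_const _ c),
    pv_filter_sorted (fun x => pvDep x == c) pvArr journeys]

theorem pv_pairwise_lt_ofList (l : List String) (h : l.Pairwise (· ≤ ·)) :
    (PySem.Set.ofList l).Pairwise (· < ·) := by
  have hsub : (PySem.Set.ofList l).Sublist l := by
    rw [pv_ofList_eq_new]; exact pv_new_sublist l []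
  have hle : (PySem.Set.ofList l).Pairwise (· ≤ ·) := List.Pairwise.sublist hsub h
  have hnd : (PySem.Set.ofList l).Pairwise (· ≠ ·) := PySem.Set.nodup_ofList l
  exact (hle.and hnd).imp (fun hab => lt_of_le_of_ne hab.1 hab.2)

theorem pv_perm_ofList (l l' : List String) (h : l.Perm l') :
    (PySem.Set.ofList l).Perm (PySem.Set.ofList l') := by
  refine (List.perm_ext_iff_of_nodup (PySem.Set.nodup_ofList l) (PySem.Set.nodup_ofList l')).mpr ?_
  intro a
  rw [PySem.Set.mem_ofList, PySem.Set.mem_ofList]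
  exact h.mem_iff

theorem pv_A_eq (journeys : List (List (String × String))) :
    filter_journeys_py journeys
      = (PySem.List.sorted (List.foldl pvStepA PySem.Dict.empty journeys).keys (fun k => k) false).map
          (fun k => (List.foldl pvStepA PySem.Dict.empty journeys).getD k []) := rfl

theorem pv_B_eq (journeys : List (List (String × String))) :
    filter_journeys_py_alt journeys
      = ((PySem.List.sorted (PySem.List.sorted journeys pvArr false) pvDep false).foldl pvStepB
          ((PySem.Set.empty : PySem.Set String), ([] : List (List (String × String))))).2 := rfl

theorem pv_main (journeys : List (List (String × String))) :
    filter_journeys_py journeys = filter_journeys_py_alt journeys := by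
  have hB : filter_journeys_py_alt journeys
      = (pvNew [] ((PySem.List.sorted (PySem.List.sorted journeys pvArr false) pvDep false).map pvDep)).map
          (fun c => ((PySem.List.sorted (PySem.List.sorted journeys pvArr false) pvDep false).filter
            (fun x => pvDep x == c)).headD []) := by
    rw [pv_B_eq, pv_scan_foldl, List.nil_append, pv_scan_eq_map]
    rfl
  have hA : filter_journeys_py journeys
      = (PySem.List.sorted (PySem.Set.ofList (journeys.map pvDep)) (fun k => k) false).map
          (fun c => (pvRun none (journeys.filter (fun x => pvDep x == c))).getD []) := by
    rw [pv_A_eq]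
    have hk : (journeys.foldl pvStepA PySem.Dict.empty).keys
        = PySem.Set.ofList (journeys.map pvDep) := by
      rw [pv_foldA_keys, PySem.Set.ofList_eq_foldl]
      rfl
    rw [hk]
    apply List.map_congr_left
    intro c _
    rw [PySem.Dict.getD_eq_get?_getD, pv_foldA_get?, PySem.Dict.get?_empty]
  rw [hA, hB]
  have hsorted : PySem.List.sorted (PySem.Set.ofList (journeys.map pvDep)) (fun k => k) false
      = pvNew [] ((PySem.List.sorted (PySem.List.sorted journeys pvArr false) pvDep false).map pvDep) := by
    rw [← pv_ofList_eq_new]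
    apply PySem.List.sorted_eq_of_perm_of_pairwise_lt
    · exact pv_perm_ofList _ _
        (((PySem.List.sorted_perm (PySem.List.sorted journeys pvArr false) pvDep false).trans
          (PySem.List.sorted_perm journeys pvArr false)).map pvDep)
    · exact pv_pairwise_lt_ofList _
        (PySem.List.sorted_map_key_pairwise (PySem.List.sorted journeys pvArr false) pvDep)
  rw [hsorted]
  apply List.map_congr_left
  intro c _
  rw [pv_group_eq, List.headD_eq_head?, pv_run_head]

-- ===== VERDICT (by name: the statement is the Claim_ definition above) =====
theorem filter_journeys_py_spec : Claim_equal_filter_journeys_py := by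
  intro journeys _ _
  unfold Spec_filter_journeys_py
  exact pv_main journeys
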